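-- pv_equiv track=rewrite | github.com/Anton-TC/EaStat | EaStat_Compiler_VersionB/maquina_virtual.py | getConfigConsts
-- ===== SOURCE A (Python) =====
-- def getConfigConsts(misConstantes):
--     config = [0 for i in range(4)]
--     for nombre, const in misConstantes.items():
--         if const['tipo'] == 'ent':
--             config[0] = config[0] + 1
--         elif const['tipo'] == 'flot':
--             config[1] = config[1] + 1
--         elif const['tipo'] == 'car':
--             config[2] = config[2] + 1
--         else:
--             config[3] = config[3] + 1
--     return config
-- ===== SOURCE B (Python) =====
-- def getConfigConsts(misConstantes):
--     tipos = [const['tipo'] for const in misConstantes.values()]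
--     e = tipos.count('ent')
--     f = tipos.count('flot')
--     c = tipos.count('car')
--     return [e, f, c, len(tipos) - e - f - c]
-- ===== Notes on version B (the rewrite author's own statement) =====
-- stated objective: idiomatic
-- what changed: Replaces the per-item if/elif/else increments into a mutable 4-cell list by extracting the type tags once, counting each known tag with list.count, and deriving the else bucket by subtraction from the total.
import Mathlib
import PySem

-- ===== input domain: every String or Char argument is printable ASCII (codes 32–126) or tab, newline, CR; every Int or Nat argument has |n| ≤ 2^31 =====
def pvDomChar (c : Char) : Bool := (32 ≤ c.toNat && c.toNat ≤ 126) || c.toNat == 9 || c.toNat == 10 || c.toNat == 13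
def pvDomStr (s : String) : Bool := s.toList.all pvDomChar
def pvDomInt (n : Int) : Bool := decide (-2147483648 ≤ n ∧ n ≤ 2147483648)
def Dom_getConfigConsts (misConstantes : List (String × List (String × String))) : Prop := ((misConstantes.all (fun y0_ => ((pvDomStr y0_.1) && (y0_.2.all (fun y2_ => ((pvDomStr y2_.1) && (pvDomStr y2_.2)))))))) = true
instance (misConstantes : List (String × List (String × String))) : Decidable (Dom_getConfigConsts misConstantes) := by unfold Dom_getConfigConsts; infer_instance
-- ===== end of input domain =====

-- B extracts the type tags once and counts the three known tags with list.count,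
-- deriving the else bucket by subtraction; A walks the dict once updating a 4-cell list.

-- ===== PORT A =====
-- one step of A's loop body: the if/elif/else chain on const['tipo'], updating config
def gccStep (config : Int × Int × Int × Int) (kv : String × List (String × String)) :
    Int × Int × Int × Int :=
  let t := (PySem.Dict.ofList kv.2).get? "tipo"   -- const['tipo'] (Pre_ guarantees some)
  if t == some "ent" then (config.1 + 1, config.2.1, config.2.2.1, config.2.2.2)
  else if t == some "flot" then (config.1, config.2.1 + 1, config.2.2.1, config.2.2.2)
  else if t == some "car" then (config.1, config.2.1, config.2.2.1 + 1, config.2.2.2)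
  else (config.1, config.2.1, config.2.2.1, config.2.2.2 + 1)

def getConfigConsts (misConstantes : List (String × List (String × String))) : List Int :=
  let config : Int × Int × Int × Int := (0, 0, 0, 0)
  let config := ((PySem.Dict.ofList misConstantes).items).foldl gccStep config
  [config.1, config.2.1, config.2.2.1, config.2.2.2]

-- ===== PORT B =====
def getConfigConsts_alt (misConstantes : List (String × List (String × String))) : List Int :=
  let tipos := ((PySem.Dict.ofList misConstantes).values).map
    (fun const => (PySem.Dict.ofList const).get? "tipo")
  let e : Int := tipos.count (some "ent")
  let f : Int := tipos.count (some "flot")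
  let c : Int := tipos.count (some "car")
  [e, f, c, (tipos.length : Int) - e - f - c]

-- ===== PRECONDITION & SPEC =====
-- Pre_ excludes inputs on which A raises KeyError: a constant (after dict dedup) lacking key 'tipo'.
def Pre_getConfigConsts (misConstantes : List (String × List (String × String))) : Prop :=
  (((PySem.Dict.ofList misConstantes).values).all
    (fun const => (PySem.Dict.ofList const).contains "tipo")) = true
instance (misConstantes : List (String × List (String × String))) : Decidable (Pre_getConfigConsts misConstantes) := by unfold Pre_getConfigConsts; infer_instance

def pvWitness_getConfigConsts : (List (String × List (String × String))) :=
  [("x", [("tipo", "ent")]), ("y", [("tipo", "raro")])]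

def Spec_getConfigConsts (misConstantes : List (String × List (String × String))) (out : List Int) : Prop := out = getConfigConsts_alt misConstantes
instance (misConstantes : List (String × List (String × String))) (out : List Int) : Decidable (Spec_getConfigConsts misConstantes out) := by unfold Spec_getConfigConsts; infer_instance

-- ===== CLAIM (what is proved, stated in full; the proofs are below) =====
def Claim_equal_getConfigConsts : Prop := ∀ (misConstantes : List (String × List (String × String))), Dom_getConfigConsts misConstantes → Pre_getConfigConsts misConstantes → Spec_getConfigConsts misConstantes (getConfigConsts misConstantes)

-- ===== LEMMAS AND PROOFS =====

-- tag of one entry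
def gccTag (kv : String × List (String × String)) : Option String :=
  (PySem.Dict.ofList kv.2).get? "tipo"

lemma gcc_foldl (l : List (String × List (String × String))) (a b c d : Int) :
    l.foldl gccStep (a, b, c, d) =
      (a + ((l.map gccTag).count (some "ent") : Int),
       b + ((l.map gccTag).count (some "flot") : Int),
       c + ((l.map gccTag).count (some "car") : Int),
       d + ((l.length : Int)
            - ((l.map gccTag).count (some "ent") : Int)
            - ((l.map gccTag).count (some "flot") : Int)
            - ((l.map gccTag).count (some "car") : Int))) := by
  induction l generalizing a b c d with
  | nil => simp
  | cons x xs ih =>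
    have hx : gccStep (a, b, c, d) x =
        (if gccTag x == some "ent" then (a + 1, b, c, d)
         else if gccTag x == some "flot" then (a, b + 1, c, d)
         else if gccTag x == some "car" then (a, b, c + 1, d)
         else (a, b, c, d + 1)) := rfl
    by_cases h1 : gccTag x = some "ent"
    · simp only [hx, List.foldl_cons, List.map_cons, List.count_cons, List.length_cons]
      simp [h1]
      rw [ih]
      simp only [Prod.mk.injEq]
      push_cast
      and_intros <;> first | omega | trivial
    · by_cases h2 : gccTag x = some "flot"
      · simp only [hx, List.foldl_cons, List.map_cons, List.count_cons, List.length_cons]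
        simp [h2]
        rw [ih]
        simp only [Prod.mk.injEq]
        push_cast
        and_intros <;> first | omega | trivial
      · by_cases h3 : gccTag x = some "car"
        · simp only [hx, List.foldl_cons, List.map_cons, List.count_cons, List.length_cons]
          simp [h3]
          rw [ih]
          simp only [Prod.mk.injEq]
          push_cast
          and_intros <;> first | omega | trivial
        · have h1' : ¬(some "ent" = gccTag x) := fun h => h1 h.symm
          simp only [hx, List.foldl_cons, List.map_cons, List.count_cons, List.length_cons]
          simp [h1, h2, h3]
          rw [ih]
          simp only [Prod.mk.injEq]
          push_cast
          and_intros <;> first | omega | trivial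

-- the composed map in getConfigConsts_alt is the tag map of gcc_foldl
lemma gcc_map_eq (l : List (String × List (String × String))) :
    l.map ((fun const => (PySem.Dict.ofList const).get? "tipo") ∘ fun x => x.2) =
      l.map gccTag := rfl

-- ===== VERDICT (by name: the statement is the Claim_ definition above) =====
theorem getConfigConsts_spec : Claim_equal_getConfigConsts := by
  intro m _ _
  unfold Spec_getConfigConsts getConfigConsts getConfigConsts_alt
  simp only [PySem.Dict.values, List.map_map, gcc_map_eq, gcc_foldl, zero_add, List.length_map]
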